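-- pv_equiv track=rewrite | github.com/GrooveWJH/ArbitrageStation | backend/core/pnl_v2_logic.py | combine_quality
-- ===== SOURCE A (Python) =====
-- from typing import Iterable
--
-- def combine_quality(qualities: Iterable[str]) -> str:
--     vals = [str(q or "ok") for q in qualities]
--     if not vals:
--         return "ok"
--     if all(v == "na" for v in vals):
--         return "na"
--     rank = {"ok": 0, "na": 0, "partial": 1, "stale": 2, "missing": 3}
--     best = "ok"
--     for q in vals:
--         if rank.get(q, 0) > rank[best]:
--             best = q
--     return best
-- ===== SOURCE B (Python) =====
-- def combine_quality(qualities):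
--     vals = [str(q) if q else "ok" for q in qualities]
--     if not vals:
--         return "ok"
--     s = set(vals)
--     if s == {"na"}:
--         return "na"
--     for level in ("missing", "stale", "partial"):
--         if level in s:
--             return level
--     return "ok"
-- ===== Notes on version B (the rewrite author's own statement) =====
-- stated objective: alternative
-- what changed: Replaced A's per-element running-max scan over a rank dictionary by a membership set built once plus a single pass over the fixed severity ladder from worst to mildest.
import Mathlib
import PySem

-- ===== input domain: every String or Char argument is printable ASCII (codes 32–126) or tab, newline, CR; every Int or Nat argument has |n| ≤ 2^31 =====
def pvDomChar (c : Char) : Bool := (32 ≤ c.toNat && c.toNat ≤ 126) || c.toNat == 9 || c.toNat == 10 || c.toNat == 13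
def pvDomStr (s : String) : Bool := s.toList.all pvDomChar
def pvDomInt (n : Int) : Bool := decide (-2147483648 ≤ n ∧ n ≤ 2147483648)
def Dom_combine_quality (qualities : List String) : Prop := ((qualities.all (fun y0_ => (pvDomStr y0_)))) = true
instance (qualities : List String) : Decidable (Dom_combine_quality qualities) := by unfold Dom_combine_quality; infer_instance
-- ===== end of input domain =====

-- B replaces A's per-element running-max scan over a rank dict with a membership set plus one pass over the fixed severity ladder; equivalence on the return value is proved below.


-- ===== PORT A =====
-- rank = {"ok": 0, "na": 0, "partial": 1, "stale": 2, "missing": 3}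
def pvRank : PySem.Dict String Int :=
  PySem.Dict.ofList [("ok", 0), ("na", 0), ("partial", 1), ("stale", 2), ("missing", 3)]

def combine_quality (qualities : List String) : String :=
  -- vals = [str(q or "ok") for q in qualities]  (arguments are strings, so str() is the identity; "" is the only falsy string)
  let vals := qualities.map (fun q => if q == "" then "ok" else q)
  if vals = [] then "ok"
  else if vals.all (fun v => v == "na") then "na"
  else
    -- rank[best] never raises: best starts at "ok" and is only replaced by keys of rank, so getD is exact here
    vals.foldl (fun best q => if pvRank.getD q 0 > pvRank.getD best 0 then q else best) "ok"

-- ===== PORT B =====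
def combine_quality_alt (qualities : List String) : String :=
  let vals := qualities.map (fun q => if q == "" then "ok" else q)
  if vals = [] then "ok"
  else
    let s : PySem.Set String := PySem.Set.ofList vals
    if PySem.Set.equal s ["na"] then "na"
    else
      -- for level in ("missing","stale","partial"): if level in s: return level   /   return "ok"
      match ["missing", "stale", "partial"].find? (fun level => PySem.Set.contains s level) with
      | some level => level
      | none => "ok"

-- ===== PRECONDITION & SPEC =====
def Spec_combine_quality (qualities : List String) (out : String) : Prop := out = combine_quality_alt qualities
instance (qualities : List String) (out : String) : Decidable (Spec_combine_quality qualities out) := by unfold Spec_combine_quality; infer_instance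

-- ===== CLAIM (what is proved, stated in full; the proofs are below) =====
def Claim_equal_combine_quality : Prop := ∀ (qualities : List String), Dom_combine_quality qualities → Spec_combine_quality qualities (combine_quality qualities)

-- ===== LEMMAS AND PROOFS =====

-- the rank dictionary as a plain function
def pvRk (q : String) : Int :=
  if q = "missing" then 3 else if q = "stale" then 2 else if q = "partial" then 1 else 0

lemma pvRank_getD (q : String) : pvRank.getD q 0 = pvRk q := by
  unfold pvRk
  by_cases h3 : q = "missing"
  · subst h3; decide
  by_cases h2 : q = "stale"
  · subst h2; decide
  by_cases h1 : q = "partial"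
  · subst h1; decide
  by_cases h4 : q = "ok"
  · subst h4; decide
  by_cases h5 : q = "na"
  · subst h5; decide
  rw [if_neg h3, if_neg h2, if_neg h1]
  rw [PySem.Dict.getD_of_not_contains]
  have hk : pvRank = PySem.Dict.mk [("ok", 0), ("na", 0), ("partial", 1), ("stale", 2), ("missing", 3)] := by decide
  rw [hk, PySem.Dict.contains_eq_decide_mem_keys]
  simp [h1, h2, h3, h4, h5]

-- A's running-max loop returns the highest-severity name present (ties broken by severity names being unique per rank)
lemma fold_char (l : List String) (best : String)
    (hb : best = "ok" ∨ best = "partial" ∨ best = "stale" ∨ best = "missing") :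
    l.foldl (fun b q => if pvRk q > pvRk b then q else b) best =
      if "missing" ∈ l ∨ best = "missing" then "missing"
      else if "stale" ∈ l ∨ best = "stale" then "stale"
      else if "partial" ∈ l ∨ best = "partial" then "partial"
      else best := by
  induction l generalizing best with
  | nil => rcases hb with h|h|h|h <;> subst h <;> simp
  | cons q l ih =>
    by_cases hq3 : "missing" = q <;> by_cases hq2 : "stale" = q <;> by_cases hq1 : "partial" = q <;>
      rcases hb with h|h|h|h <;> subst h <;>
      (try subst q) <;>
      (first
        | simp_all [List.foldl_cons, pvRk, Ne.symm hq3, Ne.symm hq2, Ne.symm hq1]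
        | simp_all [List.foldl_cons, pvRk])

-- ===== VERDICT (by name: the statement is the Claim_ definition above) =====
theorem combine_quality_spec : Claim_equal_combine_quality := by
  intro qualities _
  unfold Spec_combine_quality combine_quality combine_quality_alt
  simp only []
  generalize (qualities.map (fun q => if q == "" then "ok" else q)) = vals
  by_cases hnil : vals = []
  · simp [hnil]
  · rw [if_neg hnil, if_neg hnil]
    have hguard : PySem.Set.equal (PySem.Set.ofList vals) ["na"] = vals.all (fun v => v == "na") := by
      cases hall : vals.all (fun v => v == "na") with
      | true =>
        simp only [List.all_eq_true, beq_iff_eq] at hall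
        apply (PySem.Set.equal_iff _ _).mpr
        intro x
        simp only [PySem.Set.mem_ofList, List.mem_singleton]
        constructor
        · exact fun hx => hall x hx
        · intro hx
          obtain ⟨v, hv⟩ := List.exists_mem_of_ne_nil vals hnil
          subst hx
          exact (hall v hv) ▸ hv
      | false =>
        simp only [List.all_eq_false] at hall
        obtain ⟨v, hv, hvna⟩ := hall
        by_contra hc
        rw [Bool.not_eq_false] at hc
        have := (PySem.Set.equal_iff _ _).mp hc v
        simp only [PySem.Set.mem_ofList, List.mem_singleton] at this
        exact hvna (by simp [this.mp hv])
    rw [hguard]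
    cases hall : vals.all (fun v => v == "na") with
    | true => simp
    | false =>
      simp only [Bool.false_eq_true, if_false]
      have hfun : (fun best q => if pvRank.getD q 0 > pvRank.getD best 0 then q else best)
                = (fun b q => if pvRk q > pvRk b then q else b) := by
        funext b q; rw [pvRank_getD, pvRank_getD]
      rw [hfun, fold_char vals "ok" (Or.inl rfl)]
      by_cases h3 : "missing" ∈ vals <;> by_cases h2 : "stale" ∈ vals <;> by_cases h1 : "partial" ∈ vals <;>
        simp [List.find?, PySem.Set.mem_ofList, h1, h2, h3]
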